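-- pv_equiv track=rewrite | github.com/masseypaul/numberlinkSolver | pathResolution/plot.py | index_to_grid_hex
-- ===== SOURCE A (Python) =====
-- def index_to_grid_hex(v, grid_size, V_matrix):
--     count = 0
--     for y in range(grid_size):
--         for x in range(grid_size):
--             if V_matrix[y][x] is not None:
--                 if count == v:
--                     return (y, x)
--                 count += 1
--     return None
-- ===== SOURCE B (Python) =====
-- def index_to_grid_hex(v, grid_size, V_matrix):
--     cells = [(y, x) for y in range(grid_size) for x in range(grid_size)
--              if V_matrix[y][x] is not None]
--     return cells[v] if 0 <= v < len(cells) else None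
-- ===== Notes on version B (the rewrite author's own statement) =====
-- stated objective: simpler
-- what changed: Replaces A's counting scan with early return by building the row-major list of non-None coordinates once and indexing it directly with a range guard.
-- outside the precondition, e.g. on index_to_grid_hex(0, 2, [[1]]): A returns (0, 0), B raises IndexError
import Mathlib
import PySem

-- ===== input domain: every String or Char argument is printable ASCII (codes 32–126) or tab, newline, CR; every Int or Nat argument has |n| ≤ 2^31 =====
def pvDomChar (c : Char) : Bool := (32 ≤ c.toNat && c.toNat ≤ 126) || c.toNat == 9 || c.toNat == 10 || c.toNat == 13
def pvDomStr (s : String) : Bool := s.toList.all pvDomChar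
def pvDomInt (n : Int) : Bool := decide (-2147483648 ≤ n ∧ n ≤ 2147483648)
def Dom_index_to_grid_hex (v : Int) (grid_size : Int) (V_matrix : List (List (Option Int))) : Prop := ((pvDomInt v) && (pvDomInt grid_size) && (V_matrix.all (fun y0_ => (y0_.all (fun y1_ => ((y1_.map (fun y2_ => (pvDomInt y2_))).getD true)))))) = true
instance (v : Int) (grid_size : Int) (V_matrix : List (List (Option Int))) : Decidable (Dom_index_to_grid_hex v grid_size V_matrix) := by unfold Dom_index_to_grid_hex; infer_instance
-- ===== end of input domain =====

-- B replaces A's counting scan (early return at the v-th non-None cell) by building the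
-- full row-major list of non-None coordinates once and indexing it with a range guard (simpler).

-- ===== PORT A =====
-- inner 'for x in range(grid_size)' loop: fst = early-returned value, snd = count after the loop
def pvInnerA (v : Int) (y : Int) (row : List (Option Int)) : List Int → Int → Option (Int × Int) × Int
  | [], count => (none, count)
  | x :: xs, count =>
    match PySem.List.pyGet? row x with
    | none => (none, count)      -- IndexError in Python; excluded by Pre_
    | some cell =>
      match cell with
      | some _ => if count = v then (some (y, x), count) else pvInnerA v y row xs (count + 1)
      | none => pvInnerA v y row xs count

-- outer 'for y in range(grid_size)' loop
def pvOuterA (v : Int) (grid_size : Int) (V_matrix : List (List (Option Int))) : List Int → Int → Option (Int × Int)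
  | [], _ => none
  | y :: ys, count =>
    match PySem.List.pyGet? V_matrix y with
    | none => none               -- IndexError in Python; excluded by Pre_
    | some row =>
      let r := pvInnerA v y row (PySem.List.pyRange 0 grid_size 1) count
      match r.1 with
      | some ans => some ans
      | none => pvOuterA v grid_size V_matrix ys r.2

def index_to_grid_hex (v : Int) (grid_size : Int) (V_matrix : List (List (Option Int))) : Option (Int × Int) :=
  pvOuterA v grid_size V_matrix (PySem.List.pyRange 0 grid_size 1) 0

-- ===== PORT B =====
-- cells = [(y, x) for y in range(grid_size) for x in range(grid_size) if V_matrix[y][x] is not None]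
def pvCells (grid_size : Int) (V_matrix : List (List (Option Int))) : List (Int × Int) :=
  (PySem.List.pyRange 0 grid_size 1).flatMap (fun y =>
    (PySem.List.pyRange 0 grid_size 1).filterMap (fun x =>
      match PySem.List.pyGet? V_matrix y with
      | some row =>
        match PySem.List.pyGet? row x with
        | some (some _) => some (y, x)
        | _ => none
      | none => none))

def index_to_grid_hex_alt (v : Int) (grid_size : Int) (V_matrix : List (List (Option Int))) : Option (Int × Int) :=
  let cells := pvCells grid_size V_matrix
  if 0 ≤ v ∧ v < (cells.length : Int) then PySem.List.pyGet? cells v else none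

-- ===== PRECONDITION & SPEC =====
-- Pre_ excludes inputs where indexing V_matrix[y][x] goes out of range somewhere in the scanned
-- grid_size × grid_size block; there A may still return by finding the v-th cell before reaching
-- the bad index, while B (which always builds the full table) raises IndexError.
def Pre_index_to_grid_hex (v : Int) (grid_size : Int) (V_matrix : List (List (Option Int))) : Prop :=
  grid_size ≤ (V_matrix.length : Int) ∧
  ∀ row ∈ V_matrix.take grid_size.toNat, grid_size ≤ (row.length : Int)
instance (v : Int) (grid_size : Int) (V_matrix : List (List (Option Int))) : Decidable (Pre_index_to_grid_hex v grid_size V_matrix) := by unfold Pre_index_to_grid_hex; infer_instance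

def pvWitness_index_to_grid_hex : Int × Int × List (List (Option Int)) :=
  (1, 2, [[some 1, none], [none, some 2]])

def Spec_index_to_grid_hex (v : Int) (grid_size : Int) (V_matrix : List (List (Option Int))) (out : Option (Int × Int)) : Prop := out = index_to_grid_hex_alt v grid_size V_matrix
instance (v : Int) (grid_size : Int) (V_matrix : List (List (Option Int))) (out : Option (Int × Int)) : Decidable (Spec_index_to_grid_hex v grid_size V_matrix out) := by unfold Spec_index_to_grid_hex; infer_instance

-- ===== CLAIM (what is proved, stated in full; the proofs are below) =====
def Claim_equal_index_to_grid_hex : Prop := ∀ (v : Int) (grid_size : Int) (V_matrix : List (List (Option Int))), Dom_index_to_grid_hex v grid_size V_matrix → Pre_index_to_grid_hex v grid_size V_matrix → Spec_index_to_grid_hex v grid_size V_matrix (index_to_grid_hex v grid_size V_matrix)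

-- ===== LEMMAS AND PROOFS =====

-- the non-None coordinates of one row restricted to the column indices xs
def pvRC (y : Int) (row : List (Option Int)) (xs : List Int) : List (Int × Int) :=
  xs.filterMap (fun x =>
    match PySem.List.pyGet? row x with
    | some (some _) => some (y, x)
    | _ => none)

def pvFY (grid_size : Int) (V_matrix : List (List (Option Int))) (y : Int) : List (Int × Int) :=
  match PySem.List.pyGet? V_matrix y with
  | some row => pvRC y row (PySem.List.pyRange 0 grid_size 1)
  | none => []

lemma pvCells_eq (grid_size : Int) (V_matrix : List (List (Option Int))) :
    pvCells grid_size V_matrix =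
      (PySem.List.pyRange 0 grid_size 1).flatMap (pvFY grid_size V_matrix) := by
  unfold pvCells
  congr 1
  funext y
  unfold pvFY pvRC
  cases h : PySem.List.pyGet? V_matrix y with
  | none => simp
  | some row => simp

lemma pvInnerA_fst (v y : Int) (row : List (Option Int)) (xs : List Int) (count : Int)
    (h : ∀ x ∈ xs, (PySem.List.pyGet? row x).isSome) :
    (pvInnerA v y row xs count).1 =
      if count ≤ v then (pvRC y row xs)[(v - count).toNat]? else none := by
  induction xs generalizing count with
  | nil => simp [pvInnerA, pvRC]
  | cons x xs ih =>
    obtain ⟨cell, hx⟩ := Option.isSome_iff_exists.mp (h x (List.mem_cons_self))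
    have hrest : ∀ x' ∈ xs, (PySem.List.pyGet? row x').isSome := fun x' hx' => h x' (List.mem_cons_of_mem _ hx')
    cases cell with
    | none =>
      simp only [pvInnerA, hx, pvRC, List.filterMap_cons]
      rw [ih count hrest]; rfl
    | some c =>
      simp only [pvInnerA, hx, pvRC, List.filterMap_cons]
      by_cases hcv : count = v
      · subst hcv
        simp
      · simp only [if_neg hcv]
        rw [ih (count + 1) hrest]
        by_cases hle : count ≤ v
        · have h1 : count + 1 ≤ v := by omega
          have h2 : (v - count).toNat = (v - (count + 1)).toNat + 1 := by omega
          simp only [if_pos hle, if_pos h1, h2, pvRC]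
          rfl
        · have h1 : ¬ count + 1 ≤ v := by omega
          simp [hle, h1]

lemma pvInnerA_snd (v y : Int) (row : List (Option Int)) (xs : List Int) (count : Int)
    (h : ∀ x ∈ xs, (PySem.List.pyGet? row x).isSome)
    (hn : (pvInnerA v y row xs count).1 = none) :
    (pvInnerA v y row xs count).2 = count + (pvRC y row xs).length := by
  induction xs generalizing count with
  | nil => simp [pvInnerA, pvRC]
  | cons x xs ih =>
    obtain ⟨cell, hx⟩ := Option.isSome_iff_exists.mp (h x (List.mem_cons_self))
    have hrest : ∀ x' ∈ xs, (PySem.List.pyGet? row x').isSome := fun x' hx' => h x' (List.mem_cons_of_mem _ hx')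
    cases cell with
    | none =>
      simp only [pvInnerA, hx, pvRC, List.filterMap_cons] at hn ⊢
      rw [ih count hrest hn]; rfl
    | some c =>
      simp only [pvInnerA, hx] at hn ⊢
      by_cases hcv : count = v
      · simp [hcv] at hn
      · simp only [if_neg hcv] at hn ⊢
        rw [ih (count + 1) hrest hn]
        simp only [pvRC, List.filterMap_cons, hx]
        simp [List.length_cons]; omega

lemma pvOuterA_eq (v grid_size : Int) (V_matrix : List (List (Option Int))) (ys : List Int) (count : Int)
    (h : ∀ y ∈ ys, ∃ row, PySem.List.pyGet? V_matrix y = some row ∧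
        ∀ x ∈ PySem.List.pyRange 0 grid_size 1, (PySem.List.pyGet? row x).isSome) :
    pvOuterA v grid_size V_matrix ys count =
      if count ≤ v then (ys.flatMap (pvFY grid_size V_matrix))[(v - count).toNat]? else none := by
  induction ys generalizing count with
  | nil => simp [pvOuterA]
  | cons y ys ih =>
    obtain ⟨row, hy, hrow⟩ := h y (List.mem_cons_self)
    have hrest : ∀ y' ∈ ys, ∃ row, PySem.List.pyGet? V_matrix y' = some row ∧
        ∀ x ∈ PySem.List.pyRange 0 grid_size 1, (PySem.List.pyGet? row x).isSome :=
      fun y' hy' => h y' (List.mem_cons_of_mem _ hy')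
    have hfy : pvFY grid_size V_matrix y = pvRC y row (PySem.List.pyRange 0 grid_size 1) := by
      simp [pvFY, hy]
    simp only [pvOuterA, hy, List.flatMap_cons, hfy]
    by_cases hle : count ≤ v
    · set rc := pvRC y row (PySem.List.pyRange 0 grid_size 1) with hrc
      have hfst := pvInnerA_fst v y row (PySem.List.pyRange 0 grid_size 1) count hrow
      rw [if_pos hle, ← hrc] at hfst
      cases hidx : rc[(v - count).toNat]? with
      | some ans =>
        rw [hidx] at hfst
        obtain ⟨hlt, _⟩ := List.getElem?_eq_some_iff.mp hidx
        rw [hfst, if_pos hle, List.getElem?_append_left hlt, hidx]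
      | none =>
        rw [hidx] at hfst
        have hge : rc.length ≤ (v - count).toNat := List.getElem?_eq_none_iff.mp hidx
        have hsnd := pvInnerA_snd v y row (PySem.List.pyRange 0 grid_size 1) count hrow hfst
        rw [← hrc] at hsnd
        rw [hfst, hsnd, ih (count + rc.length) hrest]
        have h2 : count + (rc.length : Int) ≤ v := by omega
        rw [if_pos h2, if_pos hle, List.getElem?_append_right hge,
          show (v - (count + (rc.length : Int))).toNat = (v - count).toNat - rc.length from by omega]
    · have hfst : (pvInnerA v y row (PySem.List.pyRange 0 grid_size 1) count).1 = none := by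
        rw [pvInnerA_fst v y row _ count hrow]; simp [hle]
      have hsnd := pvInnerA_snd v y row (PySem.List.pyRange 0 grid_size 1) count hrow hfst
      rw [hfst, hsnd, ih _ hrest]
      have : ¬ count + ((pvRC y row (PySem.List.pyRange 0 grid_size 1)).length : Int) ≤ v := by omega
      simp [hle, this]

-- ===== VERDICT (by name: the statement is the Claim_ definition above) =====
theorem index_to_grid_hex_spec : Claim_equal_index_to_grid_hex := by
  intro v gs M _ hpre
  obtain ⟨hlen, hrows⟩ := hpre
  unfold Spec_index_to_grid_hex index_to_grid_hex index_to_grid_hex_alt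
  have hyp : ∀ y ∈ PySem.List.pyRange 0 gs 1, ∃ row, PySem.List.pyGet? M y = some row ∧
      ∀ x ∈ PySem.List.pyRange 0 gs 1, (PySem.List.pyGet? row x).isSome := by
    intro y hy
    rw [PySem.List.mem_pyRange_one] at hy
    have hylt : y.toNat < M.length := by omega
    refine ⟨M[y.toNat], ?_, ?_⟩
    · rw [PySem.List.pyGet?_of_nonneg M hy.1, List.getElem?_eq_getElem hylt]
    · intro x hx
      rw [PySem.List.mem_pyRange_one] at hx
      have hmem : M[y.toNat] ∈ M.take gs.toNat := by
        have h1 : y.toNat < gs.toNat := by omega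
        have h2 : y.toNat < (M.take gs.toNat).length := by
          simp [List.length_take]; omega
        have := List.getElem_take (xs := M) (i := y.toNat) (h := h2)
        rw [← this]
        exact List.getElem_mem h2
      have hrl := hrows _ hmem
      have hxlt : x.toNat < M[y.toNat].length := by omega
      rw [PySem.List.pyGet?_of_nonneg _ hx.1]
      rw [Option.isSome_iff_ne_none]
      simp [List.getElem?_eq_getElem hxlt]
  rw [pvOuterA_eq v gs M _ 0 hyp, pvCells_eq]
  set cells := (PySem.List.pyRange 0 gs 1).flatMap (pvFY gs M) with hc
  by_cases h0 : 0 ≤ v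
  · rw [if_pos h0]
    by_cases hv : v < (cells.length : Int)
    · rw [if_pos ⟨h0, hv⟩, PySem.List.pyGet?_of_nonneg cells h0]
      congr 1; omega
    · rw [if_neg (by tauto)]
      rw [List.getElem?_eq_none (by omega)]
  · simp [h0]
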